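-- pv_equiv track=rewrite | github.com/leifrf2/learning_2025 | learn copy/openai/cd/cd.py | cd_2
-- ===== SOURCE A (Python) =====
-- from typing import Dict, List
--
-- UPWARD_PATH = ".."
--
-- def compose_path(path_elements: List[str]) -> str:
--      if len(path_elements) > 0:
--         return '/' + '/'.join(path_elements)
--      else:
--         return str()
--
-- def cd_pathstack(path_elements: List[str], path_update: str) -> List[str]:
--     for path_segment in [p for p in path_update.split('/') if p != '']:
--             if path_segment == UPWARD_PATH:
--                 if len(path_elements) > 0:
--                     path_elements.pop(0)
--             else:
--                 path_elements.append(path_segment)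
--
--     return path_elements
--
-- def cd_2(current_dir: str, new_dir: str, soft_links: Dict) -> str:
--     path_segments_current_dir = cd_pathstack(list(), current_dir)
--     final_path_segments = cd_pathstack(path_segments_current_dir, new_dir)
--
--     left = final_path_segments
--     initial_full_path = compose_path(left)
--     right = list()
--
--     # start with looking for the full new path in the soft links
--     # if it's found, return
--     # if not found, drop the outermost path segment
--     # repeat
--     while len(left) > 0:
--          path = compose_path(left)
--          if path in soft_links.keys():
--               return soft_links[path] + compose_path(right)
--          else:
--             right = [left[-1]] + right
--             left = left[:-1]
--
--     return initial_full_path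
-- ===== SOURCE B (Python) =====
-- from typing import Dict
--
--
-- def cd_2(current_dir: str, new_dir: str, soft_links: Dict) -> str:
--     # Resolve the path with a counter instead of in-place pops: collect the
--     # non-'..' tokens once, count how many '..' actually fire, and drop that
--     # many tokens from the front in one slice.
--     tokens = []
--     alive = 0
--     fired = 0
--     for part in current_dir.split('/') + new_dir.split('/'):
--         if part == '':
--             continue
--         if part == '..':
--             if alive > 0:
--                 alive -= 1
--                 fired += 1
--         else:
--             tokens.append(part)
--             alive += 1
--     segs = tokens[fired:]
--
--     # Index each boundary prefix of the resolved path by its depth.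
--     rank = {}
--     pref = ''
--     k = 0
--     for s in segs:
--         k += 1
--         pref = pref + '/' + s
--         rank[pref] = k
--     full = pref
--
--     # One sweep over the soft-link table, keeping the deepest matching entry.
--     best = None
--     for key, val in soft_links.items():
--         r = rank.get(key)
--         if r is not None and (best is None or r > best[0]):
--             best = (r, key, val)
--     if best is None:
--         return full
--     return best[2] + full[len(best[1]):]
-- ===== Notes on version B (the rewrite author's own statement) =====
-- stated objective: alternative
-- what changed: B resolves the path with a counter (one slice dropping the fired '..' count from the front) instead of in-place pops, and replaces A's longest-prefix-first while-loop over recomposed path strings by building a depth index of boundary prefixes once and making a single sweep over the soft-link table that keeps the deepest matching entry.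
import Mathlib
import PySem

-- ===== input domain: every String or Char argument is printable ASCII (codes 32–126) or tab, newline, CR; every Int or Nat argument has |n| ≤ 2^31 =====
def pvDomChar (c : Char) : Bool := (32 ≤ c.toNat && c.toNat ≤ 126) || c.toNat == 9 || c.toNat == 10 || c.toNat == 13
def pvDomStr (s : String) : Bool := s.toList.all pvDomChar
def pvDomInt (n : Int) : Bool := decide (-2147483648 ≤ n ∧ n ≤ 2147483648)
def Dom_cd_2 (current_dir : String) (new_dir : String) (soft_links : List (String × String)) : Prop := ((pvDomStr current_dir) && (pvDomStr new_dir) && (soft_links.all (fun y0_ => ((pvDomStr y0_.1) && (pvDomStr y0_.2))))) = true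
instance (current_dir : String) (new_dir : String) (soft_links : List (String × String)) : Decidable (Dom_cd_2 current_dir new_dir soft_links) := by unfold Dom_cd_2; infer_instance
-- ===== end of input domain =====

-- B resolves the path with a counter (one slice dropping the fired '..' count) instead
-- of in-place pops, and replaces A's longest-prefix-first rescan loop by a depth index
-- of the boundary prefixes plus a single sweep over the soft-link table keeping the
-- deepest matching entry; objective: alternative.

-- ===== PORT A =====

-- compose_path
def pvComposePath (path_elements : List String) : String :=
  if path_elements.length > 0 then "/" ++ PySem.Str.join "/" path_elements else ""

-- body of cd_pathstack's for-loop ('..' pops the FIRST element, as A does)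
def pvStepA (path_elements : List String) (path_segment : String) : List String :=
  if path_segment = ".."
  then (if path_elements.length > 0 then path_elements.tail else path_elements)
  else path_elements ++ [path_segment]

-- cd_pathstack: fold the loop body over the filtered split
def pvCdPathstack (path_elements : List String) (path_update : String) : List String :=
  (((PySem.Str.split? path_update "/").getD []).filter (fun p => p ≠ "")).foldl
    pvStepA path_elements

-- A's while-loop on (left, right); left[:-1] is List.slice, left[-1] is pyGet?
def pvCdLoop (sl : PySem.Dict String String) (left right : List String)
    (initial_full_path : String) : String :=
  if _h : left.length > 0 then
    match sl.get? (pvComposePath left) with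
    | some v => v ++ pvComposePath right
    | none =>
        pvCdLoop sl (PySem.List.slice left none (some (-1)))
          (((PySem.List.pyGet? left (-1)).getD "") :: right) initial_full_path
  else initial_full_path
termination_by left.length
decreasing_by
  rw [PySem.List.slice_to_neg_one]
  simpa using Nat.pred_lt (by omega)

def cd_2 (current_dir : String) (new_dir : String) (soft_links : List (String × String)) : String :=
  let path_segments_current_dir := pvCdPathstack [] current_dir
  let final_path_segments := pvCdPathstack path_segments_current_dir new_dir
  let initial_full_path := pvComposePath final_path_segments
  pvCdLoop (PySem.Dict.mk soft_links) final_path_segments [] initial_full_path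

-- ===== PORT B =====

-- body of B's token loop over the raw split parts; state = (tokens, alive, fired)
def pvTokStep (st : List String × Int × Int) (part : String) : List String × Int × Int :=
  if part = "" then st
  else if part = ".."
  then (if st.2.1 > 0 then (st.1, st.2.1 - 1, st.2.2 + 1) else st)
  else (st.1 ++ [part], st.2.1 + 1, st.2.2)

-- segs = tokens[fired:]
def pvResolve (current_dir new_dir : String) : List String :=
  let st := (((PySem.Str.split? current_dir "/").getD [])
      ++ ((PySem.Str.split? new_dir "/").getD [])).foldl pvTokStep ([], 0, 0)
  PySem.List.slice st.1 (some st.2.2) none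

-- body of the rank loop; state = (pref, k, rank)
def pvRankStep (st : String × Int × PySem.Dict String Int) (s : String) :
    String × Int × PySem.Dict String Int :=
  (st.1 ++ "/" ++ s, st.2.1 + 1, st.2.2.insert (st.1 ++ "/" ++ s) (st.2.1 + 1))

-- body of the sweep over soft_links.items(); best = None | (rank, key, val)
def pvBestStep (rank : PySem.Dict String Int) (best : Option (Int × String × String))
    (p : String × String) : Option (Int × String × String) :=
  match rank.get? p.1 with
  | none => best
  | some r =>
    match best with
    | none => some (r, p.1, p.2)
    | some b => if r > b.1 then some (r, p.1, p.2) else best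

def cd_2_alt (current_dir : String) (new_dir : String) (soft_links : List (String × String)) : String :=
  let segs := pvResolve current_dir new_dir
  let st := segs.foldl pvRankStep ("", 0, PySem.Dict.empty)
  let full := st.1
  match (PySem.Dict.mk soft_links).items.foldl (pvBestStep st.2.2) none with
  | none => full
  | some b => b.2.2 ++ PySem.Str.slice full (some (PySem.Str.len b.2.1)) none

-- ===== PRECONDITION & SPEC =====
def Spec_cd_2 (current_dir : String) (new_dir : String) (soft_links : List (String × String)) (out : String) : Prop := out = cd_2_alt current_dir new_dir soft_links
instance (current_dir : String) (new_dir : String) (soft_links : List (String × String)) (out : String) : Decidable (Spec_cd_2 current_dir new_dir soft_links out) := by unfold Spec_cd_2; infer_instance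

-- ===== CLAIM (what is proved, stated in full; the proofs are below) =====
def Claim_equal_cd_2 : Prop := ∀ (current_dir : String) (new_dir : String) (soft_links : List (String × String)), Dom_cd_2 current_dir new_dir soft_links → Spec_cd_2 current_dir new_dir soft_links (cd_2 current_dir new_dir soft_links)

-- ===== LEMMAS AND PROOFS =====

-- comp of the k-segment boundary prefix
def pvP (segs : List String) (k : Nat) : String := pvComposePath (segs.take k)

-- the items of B's rank dictionary
def pvRankList (segs : List String) : List (String × Int) :=
  (List.range segs.length).map (fun i => (pvP segs (i + 1), (i : Int) + 1))

-- abstract longest-prefix-first scan (proof-side description of A's loop)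
def pvScan (sl : PySem.Dict String String) (full : String) : List String → String
  | [] => full
  | p :: ps =>
    match sl.get? p with
    | some v => v ++ PySem.Str.slice full (some (PySem.Str.len p)) none
    | none => pvScan sl full ps

-- the common spec: try depth m, m-1, …, 1
def pvSpecGo (sl : List (String × String)) (segs : List String) (full : String) : Nat → String
  | 0 => full
  | m + 1 =>
    match (PySem.Dict.mk sl).get? (pvP segs (m + 1)) with
    | some v => v ++ PySem.Str.slice full (some (PySem.Str.len (pvP segs (m + 1)))) none
    | none => pvSpecGo sl segs full m

-- 'depth k matches': k ≠ 0 and prefix k is a soft-link key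
def pvPB (sl : List (String × String)) (segs : List String) (k : Nat) : Bool :=
  decide (k ≠ 0) && ((PySem.Dict.mk sl).get? (pvP segs k)).isSome

-- the deepest matching depth (0 = none)
def pvK (sl : List (String × String)) (segs : List String) : Nat :=
  Nat.findGreatest (fun k => pvPB sl segs k = true) segs.length

-- ---- resolution: counter/slice = in-place pops ----

theorem tok_inv (L : List String) :
    ∀ (tokens : List String) (fired : Nat), fired ≤ tokens.length →
      ∃ (tokens' : List String) (fired' : Nat), fired' ≤ tokens'.length ∧
        L.foldl pvTokStep (tokens, ((tokens.length - fired : Nat) : Int), (fired : Int))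
          = (tokens', ((tokens'.length - fired' : Nat) : Int), (fired' : Int)) ∧
        tokens'.drop fired' = (L.filter (fun p => p ≠ "")).foldl pvStepA (tokens.drop fired) := by
  induction L with
  | nil =>
    intro tokens fired h
    exact ⟨tokens, fired, h, rfl, rfl⟩
  | cons x L ih =>
    intro tokens fired h
    by_cases hx : x = ""
    · simpa [hx, pvTokStep] using ih tokens fired h
    by_cases hdd : x = ".."
    · by_cases hlt : fired < tokens.length
      · have hstep : pvTokStep (tokens, ((tokens.length - fired : Nat) : Int), (fired : Int)) x
            = (tokens, ((tokens.length - (fired + 1) : Nat) : Int), ((fired + 1 : Nat) : Int)) := by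
          simp only [pvTokStep, if_neg hx, if_pos hdd]
          rw [if_pos (show ((tokens, ((tokens.length - fired : Nat) : Int), (fired : Int)).2.1 > 0) by simp; omega)]
          simp only [Prod.mk.injEq]
          exact ⟨trivial, by omega, by omega⟩
        obtain ⟨t', f', hf', heq, hdrop⟩ := ih tokens (fired + 1) (by omega)
        refine ⟨t', f', hf', ?_, ?_⟩
        · simpa [hstep] using heq
        · rw [hdrop]
          have hA : pvStepA (tokens.drop fired) ".." = tokens.drop (fired + 1) := by
            have hlen : (tokens.drop fired).length > 0 := by simp; omega
            simp [pvStepA, List.tail_drop]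
            omega
          simp [hdd, hA]
      · have hfe : fired = tokens.length := by omega
        have hstep : pvTokStep (tokens, ((tokens.length - fired : Nat) : Int), (fired : Int)) x
            = (tokens, ((tokens.length - fired : Nat) : Int), (fired : Int)) := by
          simp only [pvTokStep, if_neg hx, if_pos hdd]
          rw [if_neg (show ¬ ((tokens, ((tokens.length - fired : Nat) : Int), (fired : Int)).2.1 > 0) by simp; omega)]
        obtain ⟨t', f', hf', heq, hdrop⟩ := ih tokens fired h
        refine ⟨t', f', hf', by simpa [hstep] using heq, ?_⟩
        rw [hdrop]
        have hA : pvStepA (tokens.drop fired) ".." = tokens.drop fired := by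
          simp [pvStepA, hfe]
        simp [hdd, hA]
    · have hstep : pvTokStep (tokens, ((tokens.length - fired : Nat) : Int), (fired : Int)) x
          = (tokens ++ [x], (((tokens ++ [x]).length - fired : Nat) : Int), (fired : Int)) := by
        simp only [pvTokStep, if_neg hx, if_neg hdd]
        simp only [Prod.mk.injEq, List.length_append, List.length_singleton]
        exact ⟨trivial, by omega, trivial⟩
      obtain ⟨t', f', hf', heq, hdrop⟩ := ih (tokens ++ [x]) fired (by simp; omega)
      refine ⟨t', f', hf', by simpa [hstep] using heq, ?_⟩
      rw [hdrop]
      have hA : (tokens ++ [x]).drop fired = pvStepA (tokens.drop fired) x := by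
        simp [pvStepA, hdd, List.drop_append_of_le_length h]
      simp [hx, hA]
theorem resolve_eq (current_dir new_dir : String) :
    pvResolve current_dir new_dir
      = pvCdPathstack (pvCdPathstack [] current_dir) new_dir := by
  obtain ⟨t', f', hf', heq, hdrop⟩ :=
    tok_inv (((PySem.Str.split? current_dir "/").getD [])
      ++ ((PySem.Str.split? new_dir "/").getD [])) [] 0 (by simp)
  unfold pvResolve
  rw [show (([], 0, 0) : List String × Int × Int)
      = (([] : List String), ((([] : List String).length - 0 : Nat) : Int), ((0 : Nat) : Int)) by rfl]
  rw [heq]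
  show PySem.List.slice t' (some (f' : Int)) none = _
  rw [PySem.List.slice_from _ (by positivity)]
  simp only [Int.toNat_natCast]
  rw [hdrop]
  unfold pvCdPathstack
  rw [List.filter_append, List.foldl_append]
  simp

-- ---- compose_path algebra ----

-- '/'.join over an append of nonempty lists
theorem chars_join_append (sep x y : List Char) (a b : List (List Char)) :
    PySem.Chars.join sep (x :: (a ++ y :: b))
      = PySem.Chars.join sep (x :: a) ++ sep ++ PySem.Chars.join sep (y :: b) := by
  induction a generalizing x with
  | nil => simp [PySem.Chars.join_cons_cons, PySem.Chars.join_singleton]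
  | cons z a ih =>
    simp only [List.cons_append]
    rw [PySem.Chars.join_cons_cons, ih z, PySem.Chars.join_cons_cons]
    simp [List.append_assoc]

-- compose_path is a homomorphism for ++
theorem composePath_append (a b : List String) :
    pvComposePath (a ++ b) = pvComposePath a ++ pvComposePath b := by
  match a, b with
  | [], b => simp [pvComposePath]
  | a, [] => simp [pvComposePath]
  | x :: a, y :: b =>
    rw [← String.toList_inj]
    simp only [pvComposePath, List.cons_append]
    rw [if_pos (by simp), if_pos (by simp), if_pos (by simp)]
    simp only [String.toList_append, PySem.Str.toList_join, List.map_cons, List.map_append]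
    rw [chars_join_append]
    simp

theorem composePath_concat (a : List String) (s : String) :
    pvComposePath (a ++ [s]) = pvComposePath a ++ "/" ++ s := by
  rw [composePath_append]
  simp [pvComposePath, PySem.Str.join, PySem.Chars.join_singleton,
    ← String.toList_inj, String.toList_append]

-- suffix slice of a composed path
theorem slice_suffix (p q : String) :
    PySem.Str.slice (p ++ q) (some (PySem.Str.len p)) none = q := by
  rw [← String.toList_inj, PySem.Str.toList_slice, PySem.Str.len_eq]
  show PySem.List.slice _ _ _ = _
  rw [PySem.List.slice_from _ (by positivity)]
  simp

theorem lenP_succ (segs : List String) (j : Nat) (hj : j < segs.length) :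
    PySem.Str.len (pvP segs (j + 1))
      = PySem.Str.len (pvP segs j) + 1 + PySem.Str.len segs[j] := by
  have ht : segs.take (j + 1) = segs.take j ++ [segs[j]] := by
    rw [List.take_add_one]
    simp [List.getElem?_eq_getElem hj]
  unfold pvP
  rw [ht, composePath_concat]
  rw [PySem.Str.len_append, PySem.Str.len_append]
  simp [PySem.Str.len_eq]

theorem lenP_lt (segs : List String) (j k : Nat) (hjk : j < k) (hk : k ≤ segs.length) :
    PySem.Str.len (pvP segs j) < PySem.Str.len (pvP segs k) := by
  induction k with
  | zero => omega
  | succ m ih =>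
    have hm : m < segs.length := by omega
    have hs := lenP_succ segs m hm
    have h0 : (0:Int) ≤ PySem.Str.len segs[m] := by rw [PySem.Str.len_eq]; positivity
    rcases Nat.lt_or_ge j m with hj | hj
    · have := ih hj (by omega)
      omega
    · have hjm : j = m := by omega
      subst hjm
      omega

theorem pvP_inj (segs : List String) (j k : Nat) (hj : j ≤ segs.length)
    (hk : k ≤ segs.length) (h : pvP segs j = pvP segs k) : j = k := by
  rcases Nat.lt_trichotomy j k with hlt | he | hgt
  · exact absurd (congrArg PySem.Str.len h) (by have := lenP_lt segs j k hlt hk; omega)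
  · exact he
  · exact absurd (congrArg PySem.Str.len h) (by have := lenP_lt segs k j hgt hj; omega)

-- ---- the rank dictionary ----

theorem insert_mk_fresh (l : List (String × Int)) (k : String) (v : Int)
    (h : k ∉ l.map Prod.fst) :
    (PySem.Dict.mk l).insert k v = PySem.Dict.mk (l ++ [(k, v)]) := by
  have hc : (PySem.Dict.mk l).contains k = false := by
    simp only [PySem.Dict.contains, List.any_eq_false]
    intro p hp
    simp only [beq_iff_eq]
    intro he
    exact h (he ▸ List.mem_map_of_mem hp)
  simp [PySem.Dict.insert, hc]

theorem rank_fold (segs : List String) :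
    ∀ (l pre : List String), pre ++ l = segs →
    l.foldl pvRankStep (pvComposePath pre, (pre.length : Int),
        PySem.Dict.mk ((List.range pre.length).map (fun i => (pvP segs (i + 1), (i : Int) + 1))))
      = (pvComposePath segs, (segs.length : Int), PySem.Dict.mk (pvRankList segs)) := by
  intro l
  induction l with
  | nil =>
    intro pre hpre
    simp only [List.append_nil] at hpre
    subst hpre
    rfl
  | cons s rest ih =>
    intro pre hpre
    have hlen : pre.length < segs.length := by
      rw [← hpre]; simp
    have htake : segs.take (pre.length + 1) = pre ++ [s] := by
      rw [← hpre]
      rw [List.take_append]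
      simp
    have hfresh : pvP segs (pre.length + 1)
        ∉ ((List.range pre.length).map (fun i => (pvP segs (i + 1), (i : Int) + 1))).map Prod.fst := by
      simp only [List.map_map, List.mem_map, Function.comp]
      rintro ⟨i, hi, he⟩
      rw [List.mem_range] at hi
      have := pvP_inj segs (i + 1) (pre.length + 1) (by omega) (by omega) he
      omega
    have hcomp : pvComposePath pre ++ "/" ++ s = pvP segs (pre.length + 1) := by
      rw [pvP, htake, composePath_concat]
    have hstep : pvRankStep (pvComposePath pre, (pre.length : Int),
        PySem.Dict.mk ((List.range pre.length).map (fun i => (pvP segs (i + 1), (i : Int) + 1)))) s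
      = (pvComposePath (pre ++ [s]), ((pre ++ [s]).length : Int),
        PySem.Dict.mk ((List.range (pre ++ [s]).length).map (fun i => (pvP segs (i + 1), (i : Int) + 1)))) := by
      simp only [pvRankStep]
      rw [hcomp, insert_mk_fresh _ _ _ hfresh]
      rw [composePath_concat]
      simp only [Prod.mk.injEq]
      refine ⟨hcomp.symm, by simp, ?_⟩
      rw [List.length_append, List.length_singleton, List.range_succ, List.map_append]
      simp
    rw [List.foldl_cons, hstep, ih (pre ++ [s]) (by simpa using hpre)]

theorem rank_state (segs : List String) :
    segs.foldl pvRankStep ("", 0, PySem.Dict.empty)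
      = (pvComposePath segs, (segs.length : Int), PySem.Dict.mk (pvRankList segs)) := by
  have h := rank_fold segs segs [] (by simp)
  simpa [pvComposePath] using h

theorem get?_mk_append {ν : Type} (l : List (String × ν)) (q : String × ν) (x : String) :
    (PySem.Dict.mk (l ++ [q])).get? x
      = match (PySem.Dict.mk l).get? x with
        | some v => some v
        | none => if q.1 = x then some q.2 else none := by
  simp only [PySem.Dict.get?, List.find?_append]
  cases h : List.find? (fun p => p.1 == x) l with
  | some p => simp
  | none =>
    by_cases hq : q.1 = x
    · simp [List.find?, hq]
    · rw [List.find?_cons_of_neg (by simpa using hq)]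
      simp [hq]

theorem nodup_keys_rankList (segs : List String) :
    ((pvRankList segs).map Prod.fst).Nodup := by
  unfold pvRankList
  rw [List.map_map]
  refine List.Nodup.map_on ?_ List.nodup_range
  intro i hi j hj he
  rw [List.mem_range] at hi hj
  have := pvP_inj segs (i + 1) (j + 1) (by omega) (by omega) he
  omega

theorem rank_get_some (segs : List String) (key : String) (r : Int) :
    ((PySem.Dict.mk (pvRankList segs)).get? key = some r
      ↔ ∃ k : Nat, k < segs.length ∧ key = pvP segs (k + 1) ∧ r = (k : Int) + 1) := by
  have hnd : (PySem.Dict.mk (pvRankList segs)).keys.Nodup := by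
    simpa [PySem.Dict.keys] using nodup_keys_rankList segs
  rw [PySem.Dict.get?_eq_some_iff_mem_items (PySem.Dict.mk (pvRankList segs)) key r hnd]
  show (key, r) ∈ pvRankList segs ↔ _
  unfold pvRankList
  simp only [List.mem_map, List.mem_range, Prod.mk.injEq]
  constructor
  · rintro ⟨i, hi, hk, hr⟩
    exact ⟨i, hi, hk.symm, hr.symm⟩
  · rintro ⟨i, hi, hk, hr⟩
    exact ⟨i, hi, hk.symm, hr.symm⟩

theorem rank_get_none (segs : List String) (key : String) :
    ((PySem.Dict.mk (pvRankList segs)).get? key = none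
      ↔ ∀ k : Nat, k < segs.length → key ≠ pvP segs (k + 1)) := by
  rw [PySem.Dict.get?_eq_none_iff_not_mem_keys]
  show key ∉ (pvRankList segs).map Prod.fst ↔ _
  unfold pvRankList
  rw [List.map_map]
  simp [Function.comp, eq_comm]

-- ---- A's loop = the common spec ----

theorem tail_concat_of_ne_nil {α : Type} (A : List α) (e : α) (h : A ≠ []) :
    (A ++ [e]).tail = A.tail ++ [e] := by
  cases A with
  | nil => simp at h
  | cons a t => simp

theorem revPrefixes_succ (l : List String) (x : String) :
    (((l ++ [x]).inits.tail.map pvComposePath).reverse)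
      = pvComposePath (l ++ [x]) :: ((l.inits.tail.map pvComposePath).reverse) := by
  rw [List.inits_append]
  have hini : List.map (fun t => l ++ t) (List.inits [x]).tail = [l ++ [x]] := by
    simp [List.inits]
  rw [hini]
  have hne : l.inits ≠ [] := by
    have hlen : l.inits.length = l.length + 1 := by simp
    intro hc; rw [hc] at hlen; simp at hlen
  rw [tail_concat_of_ne_nil _ _ hne]
  simp

-- A's loop equals the scan over the reversed nonempty-prefix list
theorem loop_eq_scan (sl : PySem.Dict String String) (full : String) :
    ∀ (left right : List String), full = pvComposePath (left ++ right) →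
      pvCdLoop sl left right full
        = pvScan sl full ((left.inits.tail.map pvComposePath).reverse) := by
  intro left
  induction left using List.reverseRecOn with
  | nil => intro right _; rw [pvCdLoop]; simp [pvScan]
  | append_singleton l x ih =>
    intro right hfull
    rw [pvCdLoop]
    simp only [List.length_append, List.length_singleton, gt_iff_lt]
    rw [dif_pos (by omega)]
    rw [revPrefixes_succ, pvScan]
    cases hget : sl.get? (pvComposePath (l ++ [x])) with
    | some v =>
      have hsplit : full = pvComposePath (l ++ [x]) ++ pvComposePath right := by
        rw [hfull, ← composePath_append]
      rw [hsplit, slice_suffix]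
    | none =>
      rw [PySem.List.slice_to_neg_one, PySem.List.pyGet?_neg_one]
      simp only [List.dropLast_concat, List.getLast?_concat, Option.getD_some]
      exact ih (x :: right) (by simpa using hfull)

theorem scan_eq_specGo (sl : List (String × String)) (segs : List String) (full : String) :
    ∀ m, m ≤ segs.length →
      pvScan (PySem.Dict.mk sl) full (((segs.take m).inits.tail.map pvComposePath).reverse)
        = pvSpecGo sl segs full m := by
  intro m
  induction m with
  | zero => intro _; simp [pvScan, pvSpecGo, List.inits]
  | succ m ih =>
    intro hm
    have htake : segs.take (m + 1) = segs.take m ++ [segs[m]'(by omega)] := by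
      rw [List.take_add_one]
      simp [List.getElem?_eq_getElem (show m < segs.length by omega)]
    rw [htake, revPrefixes_succ, ← htake]
    show (match (PySem.Dict.mk sl).get? (pvComposePath (segs.take (m + 1))) with
      | some v => v ++ PySem.Str.slice full (some (PySem.Str.len (pvComposePath (segs.take (m + 1))))) none
      | none => pvScan (PySem.Dict.mk sl) full (((segs.take m).inits.tail.map pvComposePath).reverse)) = _
    rw [ih (by omega)]
    rfl

-- ---- B's sweep = the common spec ----

theorem findGreatest_congr' (P Q : Nat → Prop) [DecidablePred P] [DecidablePred Q]
    (n : Nat) (h : ∀ k, k ≤ n → (P k ↔ Q k)) :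
    Nat.findGreatest P n = Nat.findGreatest Q n := by
  induction n with
  | zero => rfl
  | succ m ih =>
    rw [Nat.findGreatest_succ, Nat.findGreatest_succ]
    by_cases hp : P (m + 1)
    · rw [if_pos hp, if_pos ((h (m + 1) (by omega)).mp hp)]
    · rw [if_neg hp, if_neg (fun hq => hp ((h (m + 1) (by omega)).mpr hq))]
      exact ih (fun k hk => h k (by omega))

theorem bestfold_char (segs : List String) :
    ∀ (sl : List (String × String)),
      sl.foldl (pvBestStep (PySem.Dict.mk (pvRankList segs))) none
        = if pvK sl segs = 0 then none
          else some ((pvK sl segs : Int), pvP segs (pvK sl segs),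
            ((PySem.Dict.mk sl).get? (pvP segs (pvK sl segs))).getD "") := by
  intro sl
  induction sl using List.reverseRecOn with
  | nil =>
    have hz : pvK [] segs = 0 := by
      rw [pvK, Nat.findGreatest_eq_zero_iff]
      intro k _ _
      simp [pvPB, PySem.Dict.get?, List.find?]
    simp [hz]
  | append_singleton l p ih =>
    rw [List.foldl_append, List.foldl_cons, List.foldl_nil, ih]
    have hpb' : ∀ k, pvPB (l ++ [p]) segs k = true
        ↔ (pvPB l segs k = true ∨ (k ≠ 0 ∧ p.1 = pvP segs k)) := by
      intro k
      simp only [pvPB, Bool.and_eq_true, decide_eq_true_eq, Option.isSome_iff_exists]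
      constructor
      · rintro ⟨hk0, v, hv⟩
        rw [get?_mk_append] at hv
        cases hl : (PySem.Dict.mk l).get? (pvP segs k) with
        | some w => exact Or.inl ⟨hk0, w, rfl⟩
        | none =>
          rw [hl] at hv
          simp only [] at hv
          by_cases hq : p.1 = pvP segs k
          · exact Or.inr ⟨hk0, hq⟩
          · rw [if_neg hq] at hv; cases hv
      · rintro (⟨hk0, v, hv⟩ | ⟨hk0, hq⟩)
        · refine ⟨hk0, v, ?_⟩
          rw [get?_mk_append, hv]
        · refine ⟨hk0, ?_⟩
          rw [get?_mk_append]
          cases hl : (PySem.Dict.mk l).get? (pvP segs k) with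
          | some w => exact ⟨w, rfl⟩
          | none => exact ⟨p.2, by simp [hq]⟩
    cases hr : (PySem.Dict.mk (pvRankList segs)).get? p.1 with
    | none =>
      have hnone := (rank_get_none segs p.1).mp hr
      have hK : pvK (l ++ [p]) segs = pvK l segs := by
        rw [pvK, pvK]
        refine findGreatest_congr' _ _ _ (fun k hk => ?_)
        rw [hpb' k]
        constructor
        · rintro (h | ⟨hk0, hq⟩)
          · exact h
          · exact absurd hq (by
              have hk1 : k - 1 < segs.length := by omega
              have := hnone (k - 1) hk1
              rw [show k - 1 + 1 = k by omega] at this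
              exact this)
        · exact Or.inl
      have hsame : ∀ x, p.1 ≠ x → (PySem.Dict.mk (l ++ [p])).get? x = (PySem.Dict.mk l).get? x := by
        intro x hx
        rw [get?_mk_append]
        cases hl : (PySem.Dict.mk l).get? x with
        | some w => rfl
        | none => simp [hx]
      by_cases hz : pvK l segs = 0
      · simp [pvBestStep, hr, hz, hK]
      · rw [if_neg hz]
        show pvBestStep _ (some _) p = _
        rw [pvBestStep]
        rw [hr]
        rw [hK, if_neg hz]
        have hKn : pvK l segs ≤ segs.length := Nat.findGreatest_le _
        have hne : p.1 ≠ pvP segs (pvK l segs) := by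
          have hk1 : pvK l segs - 1 < segs.length := by omega
          have := hnone (pvK l segs - 1) hk1
          rw [show pvK l segs - 1 + 1 = pvK l segs by omega] at this
          exact this
        rw [hsame _ hne]
    | some r =>
      obtain ⟨k0, hk0, hp1, hrv⟩ := (rank_get_some segs p.1 r).mp hr
      set κ := k0 + 1 with hκ
      have hκn : κ ≤ segs.length := by omega
      have hpb'' : ∀ k, k ≤ segs.length →
          (pvPB (l ++ [p]) segs k = true ↔ (pvPB l segs k = true ∨ k = κ)) := by
        intro k hk
        rw [hpb' k]
        constructor
        · rintro (h | ⟨hk0', hq⟩)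
          · exact Or.inl h
          · exact Or.inr (pvP_inj segs k κ hk hκn (by rw [← hq, hp1])).symm.symm
        · rintro (h | h)
          · exact Or.inl h
          · exact Or.inr ⟨by omega, by rw [h, hp1]⟩
      have hPl : ∀ j, pvK l segs < j → j ≤ segs.length → ¬ pvPB l segs j = true := by
        intro j h1 h2
        exact Nat.findGreatest_is_greatest h1 h2
      have hgl_none : ∀ j, pvK l segs < j → j ≤ segs.length → j ≠ 0 →
          (PySem.Dict.mk l).get? (pvP segs j) = none := by
        intro j h1 h2 h3
        have := hPl j h1 h2
        simp only [pvPB, Bool.and_eq_true, decide_eq_true_eq] at this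
        cases hl : (PySem.Dict.mk l).get? (pvP segs j) with
        | some w => exact absurd ⟨h3, by rw [hl]; rfl⟩ this
        | none => rfl
      have hKle : pvK l segs ≤ segs.length := Nat.findGreatest_le _
      have hKspec : pvK l segs ≠ 0 → pvPB l segs (pvK l segs) = true := by
        rw [pvK]
        exact (Nat.findGreatest_eq_iff.mp rfl).2.1
      have hKmax : pvK (l ++ [p]) segs = max (pvK l segs) κ := by
        rw [pvK, Nat.findGreatest_eq_iff]
        refine ⟨by omega, ?_, ?_⟩
        · intro _
          rcases Nat.le_total κ (pvK l segs) with hle | hle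
          · rw [Nat.max_eq_left hle, hpb'' _ hKle]
            refine Or.inl (hKspec (by omega))
          · rw [Nat.max_eq_right hle, hpb'' _ hκn]
            exact Or.inr rfl
        · intro j hj hjn
          rw [hpb'' _ hjn]
          rintro (h | h)
          · exact hPl j (by omega) hjn h
          · omega
      by_cases hz : pvK l segs = 0
      · -- old best is none; the new entry wins
        rw [if_pos hz]
        show pvBestStep _ none p = _
        simp only [pvBestStep, hr]
        have hK' : pvK (l ++ [p]) segs = κ := by rw [hKmax, hz]; omega
        rw [hK', if_neg (by omega)]
        have hgn : (PySem.Dict.mk l).get? (pvP segs κ) = none :=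
          hgl_none κ (by omega) hκn (by omega)
        have hgv : (PySem.Dict.mk (l ++ [p])).get? (pvP segs κ) = some p.2 := by
          rw [get?_mk_append, hgn]
          simp [hp1]
        rw [hgv]
        have hri : r = ((κ : Nat) : Int) := by rw [hrv, hκ]; push_cast; ring
        rw [hri, hp1]
        rfl
      · rw [if_neg hz]
        show pvBestStep _ (some _) p = _
        simp only [pvBestStep, hr]
        by_cases hgt : κ > pvK l segs
        · rw [if_pos (show r > ((pvK l segs : Nat) : Int) by rw [hrv]; omega)]
          have hK' : pvK (l ++ [p]) segs = κ := by rw [hKmax]; omega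
          rw [hK', if_neg (by omega)]
          have hgn : (PySem.Dict.mk l).get? (pvP segs κ) = none :=
            hgl_none κ (by omega) hκn (by omega)
          have hgv : (PySem.Dict.mk (l ++ [p])).get? (pvP segs κ) = some p.2 := by
            rw [get?_mk_append, hgn]
            simp [hp1]
          rw [hgv]
          have hri : r = ((κ : Nat) : Int) := by rw [hrv, hκ]; push_cast; ring
          rw [hri, hp1]
          rfl
        · rw [if_neg (show ¬ r > ((pvK l segs : Nat) : Int) by rw [hrv]; omega)]
          have hK' : pvK (l ++ [p]) segs = pvK l segs := by rw [hKmax]; omega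
          rw [hK', if_neg hz]
          have hspec := hKspec hz
          simp only [pvPB, Bool.and_eq_true, decide_eq_true_eq,
            Option.isSome_iff_exists] at hspec
          obtain ⟨-, v, hv⟩ := hspec
          rw [get?_mk_append, hv]

theorem specGo_eq (sl : List (String × String)) (segs : List String) (full : String) :
    ∀ m, pvSpecGo sl segs full m
      = (let K := Nat.findGreatest (fun k => pvPB sl segs k = true) m;
         if K = 0 then full
         else ((PySem.Dict.mk sl).get? (pvP segs K)).getD ""
            ++ PySem.Str.slice full (some (PySem.Str.len (pvP segs K))) none) := by
  intro m
  induction m with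
  | zero => rfl
  | succ m ih =>
    simp only []
    rw [Nat.findGreatest_succ]
    cases hget : (PySem.Dict.mk sl).get? (pvP segs (m + 1)) with
    | some v =>
      have hpb : pvPB sl segs (m + 1) = true := by
        simp [pvPB, hget]
      rw [if_pos hpb]
      rw [if_neg (by omega)]
      show (match (PySem.Dict.mk sl).get? (pvP segs (m + 1)) with
        | some v => v ++ PySem.Str.slice full (some (PySem.Str.len (pvP segs (m + 1)))) none
        | none => pvSpecGo sl segs full m) = _
      rw [hget]
      simp
    | none =>
      have hpb : ¬ pvPB sl segs (m + 1) = true := by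
        simp [pvPB, hget]
      rw [if_neg hpb]
      show (match (PySem.Dict.mk sl).get? (pvP segs (m + 1)) with
        | some v => v ++ PySem.Str.slice full (some (PySem.Str.len (pvP segs (m + 1)))) none
        | none => pvSpecGo sl segs full m) = _
      rw [hget]
      exact ih

-- ===== VERDICT (by name: the statement is the Claim_ definition above) =====
theorem cd_2_spec : Claim_equal_cd_2 := by
  unfold Claim_equal_cd_2
  intro current_dir new_dir soft_links _
  unfold Spec_cd_2
  show cd_2 current_dir new_dir soft_links = cd_2_alt current_dir new_dir soft_links
  unfold cd_2 cd_2_alt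
  rw [resolve_eq]
  set segs := pvCdPathstack (pvCdPathstack [] current_dir) new_dir with hsegs
  dsimp only
  rw [rank_state]
  rw [loop_eq_scan _ _ segs [] (by simp [← hsegs])]
  have h1 : (segs.inits.tail.map pvComposePath).reverse
      = (((segs.take segs.length).inits.tail.map pvComposePath).reverse) := by
    rw [List.take_length]
  rw [h1, scan_eq_specGo _ _ _ segs.length le_rfl, specGo_eq]
  show (let K := pvK soft_links segs;
        if K = 0 then pvComposePath segs
        else ((PySem.Dict.mk soft_links).get? (pvP segs K)).getD ""
          ++ PySem.Str.slice (pvComposePath segs) (some (PySem.Str.len (pvP segs K))) none)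
    = (match soft_links.foldl (pvBestStep (PySem.Dict.mk (pvRankList segs))) none with
      | none => pvComposePath segs
      | some b => b.2.2 ++ PySem.Str.slice (pvComposePath segs) (some (PySem.Str.len b.2.1)) none)
  rw [bestfold_char]
  by_cases hz : pvK soft_links segs = 0
  · rw [if_pos hz, if_pos hz]
  · rw [if_neg hz, if_neg hz]
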